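-- pv_equiv track=rewrite | github.com/Kratospidey/phisdomjs | scripts/backfill_fields.py | security_headers_snapshot
-- ===== SOURCE A (Python) =====
-- from typing import Any, Dict, List, Optional, Tuple
--
-- def security_headers_snapshot(headers: Dict[str, Any]) -> Dict[str, Optional[str]]:
--     def get(h: str) -> Optional[str]:
--         for k, v in headers.items():
--             if k.lower() == h:
--                 return v
--         return None
--     return {
--         "hdr_csp": get("content-security-policy"),
--         "hdr_hsts": get("strict-transport-security"),
--         "hdr_xfo": get("x-frame-options"),
--         "hdr_refpol": get("referrer-policy"),
--         "hdr_permspol": get("permissions-policy"),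
--         "hdr_xcto": get("x-content-type-options"),
--     }
-- ===== SOURCE B (Python) =====
-- def security_headers_snapshot(headers):
--     fields = {
--         "content-security-policy": "hdr_csp",
--         "strict-transport-security": "hdr_hsts",
--         "x-frame-options": "hdr_xfo",
--         "referrer-policy": "hdr_refpol",
--         "permissions-policy": "hdr_permspol",
--         "x-content-type-options": "hdr_xcto",
--     }
--     out = {"hdr_csp": None, "hdr_hsts": None, "hdr_xfo": None,
--            "hdr_refpol": None, "hdr_permspol": None, "hdr_xcto": None}
--     # single back-to-front pass: later writes are overwritten by earlier
--     # entries, so the FIRST case-insensitive occurrence wins, like A.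
--     for k, v in reversed(list(headers.items())):
--         f = fields.get(k.lower())
--         if f is not None:
--             out[f] = v
--     return out
-- ===== Notes on version B (the rewrite author's own statement) =====
-- stated objective: alternative
-- what changed: B replaces A's six independent forward scans (each with an early return on the first match) by one reversed pass over the headers that blindly overwrites a preinitialised six-slot result via a name->field table, so the first occurrence wins because it is written last; no membership test or early exit remains.
import Mathlib
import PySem

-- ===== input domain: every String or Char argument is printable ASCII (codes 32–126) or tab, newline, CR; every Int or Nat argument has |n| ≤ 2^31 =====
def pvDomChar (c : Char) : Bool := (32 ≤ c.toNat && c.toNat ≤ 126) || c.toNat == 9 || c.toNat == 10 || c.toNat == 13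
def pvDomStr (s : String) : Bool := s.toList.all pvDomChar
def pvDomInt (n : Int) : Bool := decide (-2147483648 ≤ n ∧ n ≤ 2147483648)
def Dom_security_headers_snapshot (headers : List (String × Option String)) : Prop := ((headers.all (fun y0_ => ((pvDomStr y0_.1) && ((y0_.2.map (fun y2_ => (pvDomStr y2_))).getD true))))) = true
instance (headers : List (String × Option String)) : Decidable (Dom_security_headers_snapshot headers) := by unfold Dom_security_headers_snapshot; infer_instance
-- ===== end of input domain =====

-- B replaces A's six forward first-match scans by one reversed overwriting pass into a preinitialised six-slot dict (alternative decomposition, same result).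

-- ===== PORT A =====
-- A's inner helper 'get': scan headers, return first value whose lowercased key matches
def pvGetA (headers : List (String × Option String)) (h : String) : Option String :=
  match headers with
  | [] => none
  | (k, v) :: t => if PySem.Str.lower k == h then v else pvGetA t h

def security_headers_snapshot (headers : List (String × Option String)) : List (String × Option String) :=
  [ ("hdr_csp", pvGetA headers "content-security-policy"),
    ("hdr_hsts", pvGetA headers "strict-transport-security"),
    ("hdr_xfo", pvGetA headers "x-frame-options"),
    ("hdr_refpol", pvGetA headers "referrer-policy"),
    ("hdr_permspol", pvGetA headers "permissions-policy"),
    ("hdr_xcto", pvGetA headers "x-content-type-options") ]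

-- ===== PORT B =====
-- the 'fields' name -> output-field table of Source B
def pvFieldsB : PySem.Dict String String := PySem.Dict.ofList
  [ ("content-security-policy", "hdr_csp"),
    ("strict-transport-security", "hdr_hsts"),
    ("x-frame-options", "hdr_xfo"),
    ("referrer-policy", "hdr_refpol"),
    ("permissions-policy", "hdr_permspol"),
    ("x-content-type-options", "hdr_xcto") ]

-- the preinitialised 'out' dict of Source B
def pvOut0B : PySem.Dict String (Option String) := PySem.Dict.ofList
  [ ("hdr_csp", none), ("hdr_hsts", none), ("hdr_xfo", none),
    ("hdr_refpol", none), ("hdr_permspol", none), ("hdr_xcto", none) ]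

-- loop body: f = fields.get(k.lower()); if f is not None: out[f] = v
def pvStepB (out : PySem.Dict String (Option String)) (p : String × Option String) :
    PySem.Dict String (Option String) :=
  match pvFieldsB.get? (PySem.Str.lower p.1) with
  | some f => out.insert f p.2
  | none => out

def security_headers_snapshot_alt (headers : List (String × Option String)) :
    List (String × Option String) :=
  (headers.reverse.foldl pvStepB pvOut0B).items

-- ===== PRECONDITION & SPEC =====
def Spec_security_headers_snapshot (headers : List (String × Option String)) (out : List (String × Option String)) : Prop := out = security_headers_snapshot_alt headers
instance (headers : List (String × Option String)) (out : List (String × Option String)) : Decidable (Spec_security_headers_snapshot headers out) := by unfold Spec_security_headers_snapshot; infer_instance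

-- ===== CLAIM (what is proved, stated in full; the proofs are below) =====
def Claim_equal_security_headers_snapshot : Prop := ∀ (headers : List (String × Option String)), Dom_security_headers_snapshot headers → Spec_security_headers_snapshot headers (security_headers_snapshot headers)

-- ===== LEMMAS AND PROOFS =====

-- first match of h among the lowercased keys of l (None-vs-absent distinguished)
def pvFind (l : List (String × Option String)) (h : String) : Option (Option String) :=
  match l with
  | [] => none
  | (k, v) :: t => if PySem.Str.lower k == h then some v else pvFind t h

theorem pvFind_getD (l : List (String × Option String)) (h : String) :
    (pvFind l h).getD none = pvGetA l h := by
  induction l with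
  | nil => rfl
  | cons p t ih =>
    obtain ⟨k, v⟩ := p
    simp only [pvFind, pvGetA]
    split <;> simp [ih]

-- a six-slot dict with the fixed output keys
def pvMk6 (x1 x2 x3 x4 x5 x6 : Option String) : PySem.Dict String (Option String) :=
  PySem.Dict.mk
    [ ("hdr_csp", x1), ("hdr_hsts", x2), ("hdr_xfo", x3),
      ("hdr_refpol", x4), ("hdr_permspol", x5), ("hdr_xcto", x6) ]

theorem foldB_mk6 (l : List (String × Option String)) (x1 x2 x3 x4 x5 x6 : Option String) :
    l.foldr (fun p d => pvStepB d p) (pvMk6 x1 x2 x3 x4 x5 x6) =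
    pvMk6 ((pvFind l "content-security-policy").getD x1)
          ((pvFind l "strict-transport-security").getD x2)
          ((pvFind l "x-frame-options").getD x3)
          ((pvFind l "referrer-policy").getD x4)
          ((pvFind l "permissions-policy").getD x5)
          ((pvFind l "x-content-type-options").getD x6) := by
  induction l generalizing x1 x2 x3 x4 x5 x6 with
  | nil => simp [pvFind]
  | cons p t ih =>
    obtain ⟨k, v⟩ := p
    rw [List.foldr_cons, ih]
    have hf : pvFieldsB = PySem.Dict.mk
      [ ("content-security-policy", "hdr_csp"), ("strict-transport-security", "hdr_hsts"),
        ("x-frame-options", "hdr_xfo"), ("referrer-policy", "hdr_refpol"),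
        ("permissions-policy", "hdr_permspol"), ("x-content-type-options", "hdr_xcto") ] := rfl
    simp only [pvStepB, hf, PySem.Dict.get?_mk_cons, pvFind]
    by_cases h1 : PySem.Str.lower k = "content-security-policy"
    · simp [h1, pvMk6, PySem.Dict.ext_iff, PySem.Dict.items_insert]
    · by_cases h2 : PySem.Str.lower k = "strict-transport-security"
      · simp [h2, pvMk6, PySem.Dict.ext_iff, PySem.Dict.items_insert]
      · by_cases h3 : PySem.Str.lower k = "x-frame-options"
        · simp [h3, pvMk6, PySem.Dict.ext_iff, PySem.Dict.items_insert]
        · by_cases h4 : PySem.Str.lower k = "referrer-policy"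
          · simp [h4, pvMk6,
                  PySem.Dict.ext_iff, PySem.Dict.items_insert]
          · by_cases h5 : PySem.Str.lower k = "permissions-policy"
            · simp [h5, pvMk6,
                    PySem.Dict.ext_iff, PySem.Dict.items_insert]
            · by_cases h6 : PySem.Str.lower k = "x-content-type-options"
              · simp [h6, pvMk6, PySem.Dict.ext_iff, PySem.Dict.items_insert]
              · simp [Ne.symm h1, Ne.symm h2, Ne.symm h3, Ne.symm h4, Ne.symm h5, Ne.symm h6,
                      h1, h2, h3, h4, h5, h6, PySem.Dict.get?]

-- ===== VERDICT (by name: the statement is the Claim_ definition above) =====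
theorem security_headers_snapshot_spec : Claim_equal_security_headers_snapshot := by
  intro headers _
  unfold Spec_security_headers_snapshot security_headers_snapshot security_headers_snapshot_alt
  rw [List.foldl_reverse]
  have h0 : pvOut0B = pvMk6 none none none none none none := rfl
  rw [h0, foldB_mk6]
  simp [pvMk6, pvFind_getD]
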